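-- pv_equiv track=rewrite | github.com/krzyssikora/advent_of_code | aoc_2021/20_1_trench_map.py | get_output_image
-- ===== SOURCE A (Python) =====
-- def get_output_string(input_image, row, column, outer_char="."):
--     rows = range(len(input_image))
--     columns = range(len(input_image[0]))
--     output_string = ""
--     for r in range(row - 1, row + 2):
--         for c in range(column - 1, column + 2):
--             if c in columns and r in rows:
--                 output_string += input_image[r][c]
--             else:
--                 output_string += outer_char
--     return output_string
--
-- def change_string_into_number(pixel_string):
--     binary_string = ""
--     for character in pixel_string:
--         if character == "#":
--             binary_string += "1"
--         elif character == ".":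
--             binary_string += "0"
--     return int(binary_string, 2)
--
-- def get_output_image(input_image, algorithm, outer_char):
--     output_image = list()
--     rows = range(len(input_image) + 2)
--     columns = range(len(input_image[0]) + 2)
--     for row in rows:
--         output_row = ""
--         for column in columns:
--             output_string = get_output_string(input_image, row - 1, column - 1, outer_char)
--             output_row += algorithm[change_string_into_number(output_string)]
--         output_image.append(output_row)
--     return output_image
-- ===== SOURCE B (Python) =====
-- def get_output_image(input_image, algorithm, outer_char):
--     w = len(input_image[0])
--     border = [outer_char] * (w + 4)
--     grid = [border, border] + \
--         [[outer_char, outer_char] + list(row[:w]) + [outer_char, outer_char]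
--          for row in input_image] + \
--         [border, border]
--     output_image = []
--     for r in range(len(input_image) + 2):
--         line = []
--         for c in range(w + 2):
--             bits = ""
--             for dr in range(3):
--                 for dc in range(3):
--                     for ch in grid[r + dr][c + dc]:
--                         if ch == '#':
--                             bits += "1"
--                         elif ch == '.':
--                             bits += "0"
--             line.append(algorithm[int(bits, 2)])
--         output_image.append("".join(line))
--     return output_image
-- ===== Notes on version B (the rewrite author's own statement) =====
-- stated objective: alternative
-- what changed: B pre-pads the image with a 2-wide border of outer_char cells and reads each 3x3 window straight out of the padded grid in one inline pass, removing A's per-cell boundary test and its two string-building helper passes.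
import Mathlib
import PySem

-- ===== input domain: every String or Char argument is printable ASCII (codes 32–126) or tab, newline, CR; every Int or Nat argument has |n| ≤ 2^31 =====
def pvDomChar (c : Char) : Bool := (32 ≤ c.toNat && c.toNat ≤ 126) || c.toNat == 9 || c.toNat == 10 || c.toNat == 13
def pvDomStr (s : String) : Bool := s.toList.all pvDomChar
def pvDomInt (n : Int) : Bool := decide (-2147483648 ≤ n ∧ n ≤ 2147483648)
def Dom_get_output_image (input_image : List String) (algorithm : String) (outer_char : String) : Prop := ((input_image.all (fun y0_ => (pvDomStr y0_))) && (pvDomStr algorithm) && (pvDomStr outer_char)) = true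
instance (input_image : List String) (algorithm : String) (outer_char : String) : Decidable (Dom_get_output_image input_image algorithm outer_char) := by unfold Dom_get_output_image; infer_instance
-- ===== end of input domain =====

-- B replaces A's per-cell boundary branch and its two string-building helper passes by a
-- pre-padded grid of cell strings read in one inline pass per 3x3 window (objective:
-- alternative decomposition; same asymptotic cost).

-- ===== PORT A =====
def pyA_get_output_string (input_image : List String) (row : Int) (column : Int)
    (outer_char : String) : List Char :=
  let rows : Int := input_image.length
  let columns : Int := (PySem.List.pyGetD input_image 0 "").toList.length
  (PySem.List.pyRange (row - 1) (row + 2) 1).foldl (fun acc r =>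
    (PySem.List.pyRange (column - 1) (column + 2) 1).foldl (fun acc c =>
      if 0 ≤ c ∧ c < columns ∧ 0 ≤ r ∧ r < rows then
        acc ++ [PySem.List.pyGetD (PySem.List.pyGetD input_image r "").toList c ' ']
      else
        acc ++ outer_char.toList) acc) []

def pyA_change_string_into_number (pixel_string : List Char) : Int :=
  let binary_string : List Char := pixel_string.foldl (fun acc ch =>
    if ch = '#' then acc ++ ['1']
    else if ch = '.' then acc ++ ['0']
    else acc) []
  -- int(binary_string, 2): exact whenever binary_string is nonempty (Pre_ guarantees that)
  binary_string.foldl (fun a ch => 2 * a + (if ch = '1' then 1 else 0)) 0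

def get_output_image (input_image : List String) (algorithm : String) (outer_char : String) : List String :=
  let rows : Int := (input_image.length : Int) + 2
  let columns : Int := ((PySem.List.pyGetD input_image 0 "").toList.length : Int) + 2
  (PySem.List.pyRange 0 rows 1).foldl (fun output_image row =>
    output_image ++ [String.ofList ((PySem.List.pyRange 0 columns 1).foldl (fun output_row column =>
      output_row ++ [(PySem.Str.pyGet? algorithm
        (pyA_change_string_into_number
          (pyA_get_output_string input_image (row - 1) (column - 1) outer_char))).getD ' ']) [])]) []

-- ===== PORT B =====
-- a grid cell is the (possibly multi-character) string a window position contributes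
def pyB_val (grid : List (List (List Char))) (r : Int) (c : Int) : Int :=
  let bits : List Char :=
    (PySem.List.pyRange 0 3 1).foldl (fun acc dr =>
      (PySem.List.pyRange 0 3 1).foldl (fun acc dc =>
        (PySem.List.pyGetD (PySem.List.pyGetD grid (r + dr) []) (c + dc) []).foldl
          (fun acc ch => if ch = '#' then acc ++ ['1']
                         else if ch = '.' then acc ++ ['0'] else acc) acc) acc) []
  -- int(bits, 2): exact whenever bits is nonempty (Pre_ guarantees that)
  bits.foldl (fun a ch => 2 * a + (if ch = '1' then 1 else 0)) 0

def get_output_image_alt (input_image : List String) (algorithm : String) (outer_char : String) : List String :=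
  let w : Nat := (PySem.List.pyGetD input_image 0 "").toList.length
  let oc : List Char := outer_char.toList
  let border : List (List Char) := List.replicate (w + 4) oc
  let grid : List (List (List Char)) :=
    [border, border] ++
      input_image.map (fun row =>
        [oc, oc] ++ (row.toList.take w).map (fun ch => [ch]) ++ [oc, oc]) ++
      [border, border]
  (PySem.List.pyRange 0 ((input_image.length : Int) + 2) 1).map (fun r =>
    String.ofList ((PySem.List.pyRange 0 ((w : Int) + 2) 1).map (fun c =>
      (PySem.Str.pyGet? algorithm (pyB_val grid r c)).getD ' ')))

-- ===== PRECONDITION & SPEC =====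
-- helpers describing one 3x3 window of the input (used by Pre_ and the proofs)
def pvCell (img : List String) (oc : List Char) (w : Nat) (r c : Int) : List Char :=
  if 0 ≤ c ∧ c < (w : Int) ∧ 0 ≤ r ∧ r < (img.length : Int) then
    [(img.getD r.toNat "").toList.getD c.toNat ' ']
  else oc

def pvWin (img : List String) (oc : List Char) (w : Nat) (r c : Int) : List Char :=
  ([-1, 0, 1] : List Int).flatMap (fun dr =>
    ([-1, 0, 1] : List Int).flatMap (fun dc => pvCell img oc w (r + dr) (c + dc)))

def pvBits (L : List Char) : List Char :=
  L.filterMap (fun ch => if ch = '#' then some '1'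
                         else if ch = '.' then some '0' else none)

def pvVal (L : List Char) : Int :=
  L.foldl (fun a ch => 2 * a + (if ch = '1' then 1 else 0)) 0

-- Pre_ is exactly the domain on which the Python A returns normally: a nonempty image
-- (else input_image[0] raises IndexError), every row at least as long as the first (A reads
-- every row up to that width; a shorter row raises IndexError), and for every output pixel
-- the 3x3 window of the bordered image contains at least one '.'/'#' (else int('', 2) raises
-- ValueError) and its binary value indexes into algorithm (else algorithm[...] raises
-- IndexError).
def Pre_get_output_image (input_image : List String) (algorithm : String) (outer_char : String) : Prop :=
  input_image ≠ [] ∧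
  (∀ s ∈ input_image, (input_image.headD "").toList.length ≤ s.toList.length) ∧
  (∀ r ∈ List.range (input_image.length + 2),
    ∀ c ∈ List.range ((input_image.headD "").toList.length + 2),
      pvBits (pvWin input_image outer_char.toList
                (input_image.headD "").toList.length (r - 1) (c - 1)) ≠ [] ∧
      pvVal (pvBits (pvWin input_image outer_char.toList
                (input_image.headD "").toList.length (r - 1) (c - 1)))
        < (algorithm.toList.length : Int))

instance (input_image : List String) (algorithm : String) (outer_char : String) :
    Decidable (Pre_get_output_image input_image algorithm outer_char) := by
  unfold Pre_get_output_image; infer_instance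

def pvWitness_get_output_image : List String × String × String :=
  (["..", ".."], "#.", ".")

def Spec_get_output_image (input_image : List String) (algorithm : String) (outer_char : String) (out : List String) : Prop := out = get_output_image_alt input_image algorithm outer_char
instance (input_image : List String) (algorithm : String) (outer_char : String) (out : List String) : Decidable (Spec_get_output_image input_image algorithm outer_char out) := by unfold Spec_get_output_image; infer_instance

-- ===== CLAIM (what is proved, stated in full; the proofs are below) =====
def Claim_equal_get_output_image : Prop := ∀ (input_image : List String) (algorithm : String) (outer_char : String), Dom_get_output_image input_image algorithm outer_char → Pre_get_output_image input_image algorithm outer_char → Spec_get_output_image input_image algorithm outer_char (get_output_image input_image algorithm outer_char)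

-- ===== LEMMAS AND PROOFS =====
-- helper abbreviations for the proofs
def pvW (img : List String) : Nat := (PySem.List.pyGetD img 0 "").toList.length

def pvStep (v : Int) (ch : Char) : Int :=
  if ch = '#' then 2 * v + 1 else if ch = '.' then 2 * v else v

-- the string a window position (r, c) contributes in A (one pixel, or outer_char)
def pvCellS (img : List String) (oc : List Char) (r c : Int) : List Char :=
  if 0 ≤ c ∧ c < (pvW img : Int) ∧ 0 ≤ r ∧ r < (img.length : Int) then
    [PySem.List.pyGetD (PySem.List.pyGetD img r "").toList c ' ']
  else oc

theorem pvRange3 (a : Int) : PySem.List.pyRange (a - 1) (a + 2) 1 = [a - 1, a, a + 1] := by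
  rw [PySem.List.pyRange_one_cons (by omega), PySem.List.pyRange_one_cons (by omega),
      PySem.List.pyRange_one_cons (by omega), PySem.List.pyRange_one_eq_nil (by omega)]
  norm_num

theorem pvIteApp (P : Prop) [Decidable P] (acc : List Char) (x : Char) (y : List Char) :
    (if P then acc ++ [x] else acc ++ y) = acc ++ (if P then [x] else y) := by
  split <;> rfl

theorem window_eq (img : List String) (oc : String) (r c : Int) :
    pyA_get_output_string img r c oc =
      pvCellS img oc.toList (r-1) (c-1) ++ pvCellS img oc.toList (r-1) c ++
      pvCellS img oc.toList (r-1) (c+1) ++ pvCellS img oc.toList r (c-1) ++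
      pvCellS img oc.toList r c ++ pvCellS img oc.toList r (c+1) ++
      pvCellS img oc.toList (r+1) (c-1) ++ pvCellS img oc.toList (r+1) c ++
      pvCellS img oc.toList (r+1) (c+1) := by
  unfold pyA_get_output_string
  rw [pvRange3, pvRange3]
  simp only [List.foldl_cons, List.foldl_nil, pvIteApp]
  simp [pvCellS, pvW]

-- A's two passes (build the binary string, then parse it) as one filterMap + fold
theorem binary_fold (L : List Char) (acc : List Char) :
    L.foldl (fun acc ch => if ch = '#' then acc ++ ['1']
                           else if ch = '.' then acc ++ ['0'] else acc) acc
      = acc ++ L.filterMap (fun ch => if ch = '#' then some '1'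
                                      else if ch = '.' then some '0' else none) := by
  induction L generalizing acc with
  | nil => simp
  | cons e L ih =>
    by_cases h1 : e = '#'
    · simp [h1, ih]
    · by_cases h2 : e = '.' <;> simp [h1, h2, ih]

theorem num_filterMap (L : List Char) (v : Int) :
    (L.filterMap (fun ch => if ch = '#' then some '1'
                            else if ch = '.' then some '0' else none)).foldl
        (fun a ch => 2 * a + (if ch = '1' then 1 else 0)) v
      = L.foldl pvStep v := by
  induction L generalizing v with
  | nil => rfl
  | cons e L ih =>
    by_cases h1 : e = '#'
    · simp [h1, pvStep, ih]
    · by_cases h2 : e = '.' <;> simp [h1, h2, pvStep, ih]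

theorem csn_eq (L : List Char) :
    pyA_change_string_into_number L = L.foldl pvStep 0 := by
  unfold pyA_change_string_into_number
  rw [binary_fold L [], List.nil_append, num_filterMap]

theorem row_getS (s : List Char) (oc : List Char) (w : Nat) (hws : w ≤ s.length)
    (j : Int) (h0 : 0 ≤ j) (hj : j < (w : Int) + 4) :
    PySem.List.pyGetD ([oc, oc] ++ (s.take w).map (fun ch => [ch]) ++ [oc, oc]) j []
      = if 2 ≤ j ∧ j < (w : Int) + 2 then [PySem.List.pyGetD s (j - 2) ' '] else oc := by
  have hmlen : ((s.take w).map (fun ch => ([ch] : List Char))).length = w := by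
    simp [List.length_take]; omega
  rw [PySem.List.pyGetD_eq_getElem _ _ h0 (by simp; omega)]
  rcases Nat.lt_or_ge j.toNat 2 with h2 | h2
  · rw [if_neg (by omega)]
    have h01 : j.toNat = 0 ∨ j.toNat = 1 := by omega
    rcases h01 with h | h <;> simp [h]
  · obtain ⟨k, hk⟩ : ∃ k, j.toNat = k + 2 := ⟨j.toNat - 2, by omega⟩
    have hstep : ([oc, oc] ++ (s.take w).map (fun ch => ([ch] : List Char)) ++ [oc, oc])[j.toNat]'(by simp; omega)
         = ((s.take w).map (fun ch => ([ch] : List Char)) ++ [oc, oc])[k]'(by simp; omega) := by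
      simp [hk, List.getElem_append]
    rw [hstep]
    by_cases hkin : k < w
    · rw [if_pos (by omega), List.getElem_append_left (by rw [hmlen]; exact hkin)]
      have hg := PySem.List.pyGetD_eq_getElem s ' ' (i := j - 2) (by omega) (by omega)
      rw [hg]
      have hkk : (j - 2).toNat = k := by omega
      simp [hkk, List.getElem_take]
    · rw [if_neg (by omega), List.getElem_append_right (by rw [hmlen]; omega)]
      have hmin : min w s.length = w := by omega
      have h01 : k - w = 0 ∨ k - w = 1 := by omega
      rcases h01 with h | h <;> simp [hmin, h]

theorem replicate_get {α : Type} (k : Nat) (x : α) (d : α) (j : Int) (h0 : 0 ≤ j)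
    (hj : j < (k : Int)) :
    PySem.List.pyGetD (List.replicate k x) j d = x := by
  rw [PySem.List.pyGetD_eq_getElem _ _ h0 (by simpa using hj)]
  simp

theorem grid_getS (img : List String) (oc : List Char) (w : Nat)
    (hw : pvW img = w)
    (hW : ∀ s ∈ img, w ≤ s.toList.length)
    (pr pc : Int) (hpr : 0 ≤ pr) (hpr2 : pr < (img.length : Int) + 4)
    (hpc : 0 ≤ pc) (hpc2 : pc < (w : Int) + 4) :
    PySem.List.pyGetD
      (PySem.List.pyGetD
        ([List.replicate (w + 4) oc, List.replicate (w + 4) oc] ++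
          img.map (fun row => [oc, oc] ++ (row.toList.take w).map (fun ch => [ch]) ++ [oc, oc]) ++
          [List.replicate (w + 4) oc, List.replicate (w + 4) oc]) pr []) pc []
      = pvCellS img oc (pr - 2) (pc - 2) := by
  set grid := ([List.replicate (w + 4) oc, List.replicate (w + 4) oc] ++
      img.map (fun row => [oc, oc] ++ (row.toList.take w).map (fun ch => ([ch] : List Char)) ++ [oc, oc]) ++
      [List.replicate (w + 4) oc, List.replicate (w + 4) oc]) with hgrid
  have hglen : grid.length = img.length + 4 := by simp [hgrid]
  rw [PySem.List.pyGetD_eq_getElem _ _ hpr (by rw [hglen]; push_cast; omega)]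
  by_cases hmid : 2 ≤ pr ∧ pr < (img.length : Int) + 2
  · -- interior row
    obtain ⟨k, hk⟩ : ∃ k, pr.toNat = k + 2 := ⟨pr.toNat - 2, by omega⟩
    have hkn : k < img.length := by omega
    have hrow : grid[pr.toNat]'(by omega)
        = [oc, oc] ++ ((img[k]'hkn).toList.take w).map (fun ch => ([ch] : List Char)) ++ [oc, oc] := by
      simp only [hgrid]
      rw [List.getElem_append_left (by simp; omega), List.getElem_append_right (by simp; omega)]
      simp [show pr.toNat - 2 = k from by omega]
    rw [hrow]
    rw [row_getS _ oc w (hW _ (List.getElem_mem hkn)) pc hpc (by omega)]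
    unfold pvCellS
    rw [hw]
    by_cases hcb : 2 ≤ pc ∧ pc < (w : Int) + 2
    · rw [if_pos hcb, if_pos (by omega)]
      have h1 := PySem.List.pyGetD_eq_getElem img "" (i := pr - 2) (by omega) (by omega)
      rw [h1]
      have h2 : (pr - 2).toNat = k := by omega
      simp [h2]
    · rw [if_neg hcb, if_neg (by omega)]
  · -- border row: the padding
    have hbig : pr.toNat < img.length + 4 := by omega
    have hrow : grid[pr.toNat]'(by omega) = List.replicate (w + 4) oc := by
      simp only [hgrid]
      rcases Nat.lt_or_ge pr.toNat 2 with h2 | h2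
      · rw [List.getElem_append_left (by simp; omega), List.getElem_append_left (by simpa using h2)]
        have h01 : pr.toNat = 0 ∨ pr.toNat = 1 := by omega
        rcases h01 with h | h <;> simp [h]
      · have hge : img.length + 2 ≤ pr.toNat := by
          rcases (not_and_or.mp hmid) with h | h <;> omega
        rw [List.getElem_append_right (by simp; omega)]
        have h01 : pr.toNat - (img.length + 1 + 1) = 0 ∨ pr.toNat - (img.length + 1 + 1) = 1 := by
          omega
        rcases h01 with h | h <;> simp [h]
    rw [hrow, replicate_get _ _ _ _ hpc (by push_cast; omega)]
    unfold pvCellS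
    rw [if_neg (by omega)]

theorem pixel_eq (img : List String) (oc : String) (w : Nat) (hw : pvW img = w)
    (hW : ∀ s ∈ img, w ≤ s.toList.length)
    (row col : Int) (hr0 : 0 ≤ row) (hr1 : row < (img.length : Int) + 2)
    (hc0 : 0 ≤ col) (hc1 : col < (w : Int) + 2) :
    pyA_change_string_into_number (pyA_get_output_string img (row - 1) (col - 1) oc)
      = pyB_val
          ([List.replicate (w + 4) oc.toList, List.replicate (w + 4) oc.toList] ++
            img.map (fun r => [oc.toList, oc.toList] ++ (r.toList.take w).map (fun ch => [ch]) ++ [oc.toList, oc.toList]) ++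
            [List.replicate (w + 4) oc.toList, List.replicate (w + 4) oc.toList]) row col := by
  rw [window_eq img oc, csn_eq]
  unfold pyB_val
  rw [show PySem.List.pyRange 0 3 1 = [0, 1, 2] from by decide]
  simp only [List.foldl_cons, List.foldl_nil]
  rw [grid_getS img oc.toList w hw hW (row+0) (col+0) (by omega) (by omega) (by omega) (by omega),
      grid_getS img oc.toList w hw hW (row+0) (col+1) (by omega) (by omega) (by omega) (by omega),
      grid_getS img oc.toList w hw hW (row+0) (col+2) (by omega) (by omega) (by omega) (by omega),
      grid_getS img oc.toList w hw hW (row+1) (col+0) (by omega) (by omega) (by omega) (by omega),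
      grid_getS img oc.toList w hw hW (row+1) (col+1) (by omega) (by omega) (by omega) (by omega),
      grid_getS img oc.toList w hw hW (row+1) (col+2) (by omega) (by omega) (by omega) (by omega),
      grid_getS img oc.toList w hw hW (row+2) (col+0) (by omega) (by omega) (by omega) (by omega),
      grid_getS img oc.toList w hw hW (row+2) (col+1) (by omega) (by omega) (by omega) (by omega),
      grid_getS img oc.toList w hw hW (row+2) (col+2) (by omega) (by omega) (by omega) (by omega)]
  simp only [binary_fold, List.nil_append, List.foldl_append, num_filterMap]
  unfold pvStep
  ring_nf


-- ===== VERDICT (by name: the statement is the Claim_ definition above) =====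
theorem get_output_image_spec : Claim_equal_get_output_image := by
  intro img alg oc _ hpre
  unfold Spec_get_output_image
  obtain ⟨hne, hW0, _⟩ := hpre
  have hh : (img.headD "").toList.length = (PySem.List.pyGetD img 0 "").toList.length := by
    rw [PySem.List.pyGetD_zero]
    cases img with
    | nil => exact absurd rfl hne
    | cons a l => rfl
  have hW : ∀ s ∈ img, (PySem.List.pyGetD img 0 "").toList.length ≤ s.toList.length := by
    intro s hs
    have := hW0 s hs
    omega
  unfold get_output_image get_output_image_alt
  simp only [PySem.List.foldl_append_singleton_eq_map, List.nil_append]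
  apply List.map_congr_left
  intro row hrow
  rw [PySem.List.mem_pyRange_one] at hrow
  congr 1
  apply List.map_congr_left
  intro col hcol
  rw [PySem.List.mem_pyRange_one] at hcol
  congr 2
  rw [pixel_eq img oc ((PySem.List.pyGetD img 0 "").toList.length) rfl hW row col
        hrow.1 hrow.2 hcol.1 hcol.2]
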